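-- pv_equiv track=rewrite | github.com/couchbase/vbmap | scripts/check-vbmap.py | get_server_group_size_permutations
-- ===== SOURCE A (Python) =====
-- from typing import Dict, List, Any, Optional, Callable
--
-- def get_server_group_size_permutations(
--         server_group_count: int,
--         min_server_group_size: int,
--         max_server_group_size: int,
--         suppress_duplicates: bool = False) -> List[List[int]]:
--     if server_group_count == 1:
--         return [[x] for x in range(min_server_group_size, max_server_group_size + 1)]
--     partial: List[List[int]] = get_server_group_size_permutations(server_group_count - 1,
--                                                                   min_server_group_size,
--                                                                   max_server_group_size,
--                                                                   suppress_duplicates)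
--     result = []
--     already = {}
--     for i in range(min_server_group_size, max_server_group_size + 1):
--         for p in partial:
--             to_append = p + [i]
--             is_dupe = False
--             if suppress_duplicates:
--                 key = tuple(sorted(to_append))
--                 if key in already:
--                     is_dupe = True
--                 else:
--                     already[key] = True
--             if not is_dupe:
--                 result.append(to_append)
--     return result
-- ===== SOURCE B (Python) =====
-- def get_server_group_size_permutations(
--         server_group_count,
--         min_server_group_size,
--         max_server_group_size,
--         suppress_duplicates=False):
--     rng = range(min_server_group_size, max_server_group_size + 1)
--     partials = [[x] for x in rng]
--     for _ in range(server_group_count - 1):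
--         if suppress_duplicates:
--             # a combination is kept iff it stays non-increasing: that non-increasing
--             # ordering is exactly the first-seen representative of each multiset
--             partials = [p + [i] for i in rng for p in partials if p[-1] >= i]
--         else:
--             partials = [p + [i] for i in rng for p in partials]
--     return partials
-- ===== Notes on version B (the rewrite author's own statement) =====
-- stated objective: alternative
-- what changed: Replaces A's linear recursion plus a per-level dict of sorted-tuple keys by a bottom-up loop whose duplicate test is the arithmetic condition p[-1] >= i (the first-seen representative of each multiset is exactly its non-increasing arrangement), so no sorting and no hashing is done at all.
import Mathlib
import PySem

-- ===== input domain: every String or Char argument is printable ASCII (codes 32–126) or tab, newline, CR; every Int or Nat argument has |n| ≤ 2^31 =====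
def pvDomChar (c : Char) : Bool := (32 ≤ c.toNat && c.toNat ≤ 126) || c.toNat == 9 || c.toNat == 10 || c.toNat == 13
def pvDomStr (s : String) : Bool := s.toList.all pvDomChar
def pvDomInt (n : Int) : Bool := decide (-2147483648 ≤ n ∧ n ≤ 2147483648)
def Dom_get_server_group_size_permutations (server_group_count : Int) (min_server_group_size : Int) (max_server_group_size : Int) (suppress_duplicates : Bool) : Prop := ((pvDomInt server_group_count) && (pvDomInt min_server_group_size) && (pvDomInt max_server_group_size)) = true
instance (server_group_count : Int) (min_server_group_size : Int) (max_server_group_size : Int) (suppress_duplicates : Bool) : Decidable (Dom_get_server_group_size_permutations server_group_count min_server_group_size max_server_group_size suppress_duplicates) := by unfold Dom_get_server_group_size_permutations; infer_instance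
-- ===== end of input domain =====

-- B replaces A's linear recursion + per-level dict of sorted keys by a bottom-up loop whose
-- duplicate test is the arithmetic condition p[-1] >= i (no dict, no sorting); equal return values.

-- ===== PORT A =====
-- one level of A's double loop: state = (result, already)
def pvALevel (suppress_duplicates : Bool) (min_server_group_size max_server_group_size : Int)
    (partial_ : List (List Int)) : List (List Int) :=
  ((PySem.List.pyRange min_server_group_size (max_server_group_size + 1) 1).foldl (fun st i =>
    partial_.foldl (fun st p =>
      let to_append := p ++ [i]
      let is_dupe := false
      let (is_dupe, already) :=
        if suppress_duplicates then
          let key := PySem.List.sorted to_append (fun x => x) false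
          if st.2.contains key then (true, st.2)
          else (false, st.2.insert key true)
        else (is_dupe, st.2)
      if is_dupe then (st.1, already) else (st.1 ++ [to_append], already)) st)
    (([] : List (List Int)), (PySem.Dict.empty : PySem.Dict (List Int) Bool))).1

-- A's recursion on server_group_count (fuel = count.toNat; count ≤ 0 never returns in Python
-- and is outside Pre_)
def pvAGo (fuel : Nat) (min_server_group_size max_server_group_size : Int)
    (suppress_duplicates : Bool) : List (List Int) :=
  match fuel with
  | 0 => []
  | 1 => (PySem.List.pyRange min_server_group_size (max_server_group_size + 1) 1).map (fun x => [x])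
  | (n+2) =>
      pvALevel suppress_duplicates min_server_group_size max_server_group_size
        (pvAGo (n+1) min_server_group_size max_server_group_size suppress_duplicates)

def get_server_group_size_permutations (server_group_count : Int) (min_server_group_size : Int) (max_server_group_size : Int) (suppress_duplicates : Bool) : List (List Int) :=
  pvAGo server_group_count.toNat min_server_group_size max_server_group_size suppress_duplicates

-- ===== PORT B =====
-- one level of B's comprehension (p[-1] ported with pyGetD; elements are never empty)
def pvBStep (suppress_duplicates : Bool) (rng : List Int) (partials : List (List Int)) :
    List (List Int) :=
  if suppress_duplicates then
    rng.flatMap (fun i =>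
      (partials.filter (fun p => decide (i ≤ PySem.List.pyGetD p (-1) 0))).map (fun p => p ++ [i]))
  else
    rng.flatMap (fun i => partials.map (fun p => p ++ [i]))

def get_server_group_size_permutations_alt (server_group_count : Int) (min_server_group_size : Int) (max_server_group_size : Int) (suppress_duplicates : Bool) : List (List Int) :=
  let rng := PySem.List.pyRange min_server_group_size (max_server_group_size + 1) 1
  let partials := rng.map (fun x => [x])
  (List.range (server_group_count - 1).toNat).foldl
    (fun ps _ => pvBStep suppress_duplicates rng ps) partials

-- ===== PRECONDITION & SPEC =====
-- Python A recurses forever (RecursionError) for server_group_count ≤ 0; Pre_ excludes exactly that.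
def Pre_get_server_group_size_permutations (server_group_count : Int) (min_server_group_size : Int) (max_server_group_size : Int) (suppress_duplicates : Bool) : Prop :=
  1 ≤ server_group_count
instance (server_group_count : Int) (min_server_group_size : Int) (max_server_group_size : Int) (suppress_duplicates : Bool) : Decidable (Pre_get_server_group_size_permutations server_group_count min_server_group_size max_server_group_size suppress_duplicates) := by unfold Pre_get_server_group_size_permutations; infer_instance

def pvWitness_get_server_group_size_permutations : Int × Int × Int × Bool := (2, 1, 2, true)

def Spec_get_server_group_size_permutations (server_group_count : Int) (min_server_group_size : Int) (max_server_group_size : Int) (suppress_duplicates : Bool) (out : List (List Int)) : Prop := out = get_server_group_size_permutations_alt server_group_count min_server_group_size max_server_group_size suppress_duplicates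
instance (server_group_count : Int) (min_server_group_size : Int) (max_server_group_size : Int) (suppress_duplicates : Bool) (out : List (List Int)) : Decidable (Spec_get_server_group_size_permutations server_group_count min_server_group_size max_server_group_size suppress_duplicates out) := by unfold Spec_get_server_group_size_permutations; infer_instance

-- ===== CLAIM (what is proved, stated in full; the proofs are below) =====
def Claim_equal_get_server_group_size_permutations : Prop := ∀ (server_group_count : Int) (min_server_group_size : Int) (max_server_group_size : Int) (suppress_duplicates : Bool), Dom_get_server_group_size_permutations server_group_count min_server_group_size max_server_group_size suppress_duplicates → Pre_get_server_group_size_permutations server_group_count min_server_group_size max_server_group_size suppress_duplicates → Spec_get_server_group_size_permutations server_group_count min_server_group_size max_server_group_size suppress_duplicates (get_server_group_size_permutations server_group_count min_server_group_size max_server_group_size suppress_duplicates)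

-- ===== LEMMAS AND PROOFS =====

def pvNI (p : List Int) : Prop := p.Pairwise (fun a b => b ≤ a)

def pvKeyOf (p : List Int) (i : Int) : List Int := PySem.List.sorted (p ++ [i]) (fun x => x) false
def pvLastD (p : List Int) : Int := PySem.List.pyGetD p (-1) 0

theorem pvLastD_eq (p : List Int) (h : p ≠ []) : pvLastD p = p.getLast h := by
  unfold pvLastD; exact PySem.List.pyGetD_neg_one p 0 h

theorem pvNI_sorted (m : List Int) (h : pvNI m) :
    PySem.List.sorted m (fun x => x) false = m.reverse := by
  apply PySem.List.sorted_id_eq_of_perm_of_pairwise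
  · exact m.reverse_perm
  · rw [List.pairwise_reverse]; exact h

theorem pvNI_append_iff (p : List Int) (i : Int) :
    pvNI (p ++ [i]) ↔ pvNI p ∧ ∀ x ∈ p, i ≤ x := by
  unfold pvNI
  rw [List.pairwise_append]
  simp

theorem pvNI_last_le (p : List Int) (h : pvNI p) (hne : p ≠ []) :
    ∀ x ∈ p, p.getLast hne ≤ x := by
  intro x hx
  have hd : p.dropLast ++ [p.getLast hne] = p := List.dropLast_append_getLast hne
  rw [← hd] at hx h
  unfold pvNI at h
  rcases List.mem_append.mp hx with h1 | h1
  · rw [List.pairwise_append] at h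
    exact h.2.2 _ h1 _ (by simp)
  · simp at h1; omega

theorem pvNI_keep (p : List Int) (i : Int) (hNI : pvNI p) (hne : p ≠ [])
    (h : i ≤ pvLastD p) : pvNI (p ++ [i]) := by
  rw [pvNI_append_iff]
  refine ⟨hNI, fun x hx => ?_⟩
  have := pvNI_last_le p hNI hne x hx
  rw [pvLastD_eq p hne] at h
  omega

theorem pvKeyOf_keep (p : List Int) (i : Int) (h : pvNI (p ++ [i])) :
    pvKeyOf p i = (p ++ [i]).reverse :=
  pvNI_sorted _ h

theorem pvKey_inj (p p' : List Int) (i i' : Int)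
    (h1 : pvNI (p ++ [i])) (h2 : pvNI (p' ++ [i']))
    (hlen : p.length = p'.length)
    (hk : pvKeyOf p i = pvKeyOf p' i') : p = p' ∧ i = i' := by
  rw [pvKeyOf_keep p i h1, pvKeyOf_keep p' i' h2] at hk
  have h3 : p ++ [i] = p' ++ [i'] := by
    have := congrArg List.reverse hk
    simpa using this
  have := List.append_inj h3 hlen
  simp at this
  exact ⟨this.1, this.2⟩

-- the canonical first occurrence of a duplicated combination
theorem pvDupe_witness (lo hi : Int) (n : Nat) (ps : List (List Int))
    (hcomp : ∀ q : List Int, q ≠ [] → q.length = n → pvNI q → (∀ x ∈ q, lo ≤ x ∧ x ≤ hi) → q ∈ ps)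
    (p : List Int) (i : Int)
    (hne : p ≠ []) (hlenp : p.length = n) (hNIp : pvNI p) (hrngp : ∀ x ∈ p, lo ≤ x ∧ x ≤ hi)
    (hi1 : lo ≤ i) (hi2 : i ≤ hi)
    (hlt : pvLastD p < i) :
    ∃ p' ∈ ps, ∃ i', lo ≤ i' ∧ i' < i ∧ i' ≤ pvLastD p' ∧ pvKeyOf p' i' = pvKeyOf p i := by
  -- r = the non-increasing rearrangement of p ++ [i]
  set s := pvKeyOf p i with hs
  have hsp : s.Perm (p ++ [i]) := PySem.List.sorted_perm _ _ _
  have hsmono : s.Pairwise (fun a b => a ≤ b) := PySem.List.sorted_pairwise _ _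
  set r := s.reverse with hr
  have hrNI : pvNI r := by unfold pvNI; rw [hr, List.pairwise_reverse]; exact hsmono
  have hrperm : r.Perm (p ++ [i]) := (s.reverse_perm).trans hsp
  have hnpos : 0 < p.length := List.length_pos_iff.mpr hne
  have hrne : r ≠ [] := by
    intro h0
    have := hrperm.length_eq
    rw [h0] at this
    simp at this
  have hrlen : r.length = p.length + 1 := by
    have := hrperm.length_eq; simpa using this
  -- decompose r
  set i' := r.getLast hrne with hi'
  set p' := r.dropLast with hp'
  have hdec : p' ++ [i'] = r := List.dropLast_append_getLast hrne
  have hp'len : p'.length = n := by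
    have : p'.length + 1 = r.length := by rw [← hdec]; simp
    omega
  have hp'ne : p' ≠ [] := by
    intro h0
    rw [h0] at hp'len
    simp at hp'len
    omega
  have hrNI' : pvNI (p' ++ [i']) := by rw [hdec]; exact hrNI
  have hp'NI : pvNI p' := ((pvNI_append_iff p' i').mp hrNI').1
  have hi'le : ∀ x ∈ p', i' ≤ x := ((pvNI_append_iff p' i').mp hrNI').2
  have hrng_r : ∀ x ∈ r, lo ≤ x ∧ x ≤ hi := by
    intro x hx
    have : x ∈ p ++ [i] := hrperm.mem_iff.mp hx
    rcases List.mem_append.mp this with h1 | h1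
    · exact hrngp x h1
    · simp at h1; omega
  have hp'rng : ∀ x ∈ p', lo ≤ x ∧ x ≤ hi := by
    intro x hx
    exact hrng_r x (by rw [← hdec]; exact List.mem_append.mpr (Or.inl hx))
  have hp'mem : p' ∈ ps := hcomp p' hp'ne hp'len hp'NI hp'rng
  have hi'r : i' ∈ r := by rw [← hdec]; simp
  have hi'lo : lo ≤ i' := (hrng_r i' hi'r).1
  -- i' is the minimum of r, hence ≤ last of p < i
  have hmin : ∀ x ∈ r, i' ≤ x := by
    intro x hx
    rcases (List.mem_append.mp (by rw [hdec]; exact hx : x ∈ p' ++ [i'])) with h1 | h1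
    · exact hi'le x h1
    · simp at h1; omega
  have hlastp : p.getLast hne ∈ r := by
    apply hrperm.mem_iff.mpr
    exact List.mem_append.mpr (Or.inl (List.getLast_mem hne))
  have hi'lt : i' < i := by
    have := hmin _ hlastp
    rw [pvLastD_eq p hne] at hlt
    omega
  have hi'last : i' ≤ pvLastD p' := by
    rw [pvLastD_eq p' hp'ne]
    exact hi'le _ (List.getLast_mem hp'ne)
  refine ⟨p', hp'mem, i', hi'lo, hi'lt, hi'last, ?_⟩
  show PySem.List.sorted (p' ++ [i']) (fun x => x) false = s
  rw [hdec, pvNI_sorted r hrNI, hr]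
  simp

def pvInv (lo hi : Int) (n : Nat) (ps : List (List Int)) : Prop :=
  ps.Nodup ∧
  (∀ p ∈ ps, p ≠ [] ∧ p.length = n ∧ pvNI p ∧ ∀ x ∈ p, lo ≤ x ∧ x ≤ hi) ∧
  (∀ q : List Int, q ≠ [] → q.length = n → pvNI q → (∀ x ∈ q, lo ≤ x ∧ x ≤ hi) → q ∈ ps)

theorem pvInv_base (lo hi : Int) :
    pvInv lo hi 1 ((PySem.List.pyRange lo (hi + 1) 1).map (fun x => [x])) := by
  refine ⟨?_, ?_, ?_⟩
  · exact (PySem.List.nodup_pyRange_one lo (hi+1)).map (fun a b h => by simpa using h)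
  · intro p hp
    simp only [List.mem_map] at hp
    obtain ⟨x, hx, rfl⟩ := hp
    have := (PySem.List.mem_pyRange_one).mp hx
    refine ⟨by simp, by simp, by simp [pvNI], ?_⟩
    intro y hy; simp at hy; omega
  · intro q hne hlen hNI hrng
    match q, hlen with
    | [x], _ =>
      simp only [List.mem_map]
      refine ⟨x, ?_, rfl⟩
      rw [PySem.List.mem_pyRange_one]
      have := hrng x (by simp)
      omega

theorem pvBStep_true_eq (rng : List Int) (ps : List (List Int)) :
    pvBStep true rng ps = rng.flatMap (fun i =>
      (ps.filter (fun p => decide (i ≤ PySem.List.pyGetD p (-1) 0))).map (fun p => p ++ [i])) := by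
  simp [pvBStep]

theorem pvBStep_false_eq (rng : List Int) (ps : List (List Int)) :
    pvBStep false rng ps = rng.flatMap (fun i => ps.map (fun p => p ++ [i])) := by
  simp [pvBStep]

theorem pvBStep_true_mem (lo hi : Int) (ps : List (List Int)) (q : List Int) :
    q ∈ pvBStep true (PySem.List.pyRange lo (hi + 1) 1) ps ↔
      ∃ i, (lo ≤ i ∧ i ≤ hi) ∧ ∃ p ∈ ps, i ≤ pvLastD p ∧ q = p ++ [i] := by
  rw [pvBStep_true_eq]
  simp only [List.mem_flatMap, List.mem_map, List.mem_filter,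
    PySem.List.mem_pyRange_one, decide_eq_true_eq]
  unfold pvLastD
  constructor
  · rintro ⟨i, hi, p, ⟨hp, hle⟩, rfl⟩
    exact ⟨i, ⟨hi.1, by omega⟩, p, hp, hle, rfl⟩
  · rintro ⟨i, hi, p, hp, hle, rfl⟩
    exact ⟨i, ⟨hi.1, by omega⟩, p, ⟨hp, hle⟩, rfl⟩

theorem pvInv_step (lo hi : Int) (n : Nat) (ps : List (List Int)) (hn : 1 ≤ n)
    (hInv : pvInv lo hi n ps) :
    pvInv lo hi (n + 1) (pvBStep true (PySem.List.pyRange lo (hi + 1) 1) ps) := by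
  obtain ⟨hnd, hprops, hcomp⟩ := hInv
  refine ⟨?_, ?_, ?_⟩
  · -- Nodup: blocks for distinct i are disjoint (members end in i); within a block, injective map on a Nodup filter
    rw [pvBStep_true_eq, List.flatMap_def, List.nodup_flatten]
    have hblock : ∀ (i : Int) (q : List Int),
        q ∈ (ps.filter (fun p => decide (i ≤ PySem.List.pyGetD p (-1) 0))).map (fun p => p ++ [i]) →
        q.getLast? = some i := by
      intro i q hq
      simp only [List.mem_map] at hq
      obtain ⟨p, _, rfl⟩ := hq
      simp
    constructor
    · intro l hl
      simp only [List.mem_map] at hl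
      obtain ⟨i, _, rfl⟩ := hl
      exact (hnd.filter _).map (fun a b h => by simpa using h)
    · rw [List.pairwise_map]
      have := PySem.List.pairwise_lt_pyRange_one lo (hi + 1)
      refine this.imp ?_
      intro a b hab q hqa hqb
      have h1 := hblock a q hqa
      have h2 := hblock b q hqb
      rw [h1] at h2
      simp at h2
      omega
  · intro q hq
    rw [pvBStep_true_mem] at hq
    obtain ⟨i, hi, p, hp, hle, rfl⟩ := hq
    obtain ⟨hne, hlen, hNI, hrng⟩ := hprops p hp
    refine ⟨by simp, by simp [hlen], pvNI_keep p i hNI hne hle, ?_⟩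
    intro x hx
    rcases List.mem_append.mp hx with h1 | h1
    · exact hrng x h1
    · simp at h1; omega
  · intro q hne hlen hNI hrng
    rw [pvBStep_true_mem]
    set i := q.getLast hne with hidef
    set p := q.dropLast with hpdef
    have hdec : p ++ [i] = q := List.dropLast_append_getLast hne
    have hplen : p.length = n := by
      have : p.length + 1 = q.length := by rw [← hdec]; simp
      omega
    have hpne : p ≠ [] := by
      intro h0; rw [h0] at hplen; simp at hplen; omega
    have hNI' : pvNI (p ++ [i]) := by rw [hdec]; exact hNI
    have hpNI : pvNI p := ((pvNI_append_iff p i).mp hNI').1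
    have hile : ∀ x ∈ p, i ≤ x := ((pvNI_append_iff p i).mp hNI').2
    have hprng : ∀ x ∈ p, lo ≤ x ∧ x ≤ hi := by
      intro x hx; exact hrng x (by rw [← hdec]; exact List.mem_append.mpr (Or.inl hx))
    have hirng := hrng i (by rw [← hdec]; simp)
    refine ⟨i, hirng, p, hcomp p hpne hplen hpNI hprng, ?_, hdec.symm⟩
    rw [pvLastD_eq p hpne]
    exact hile _ (List.getLast_mem hpne)

def pvAStepT (i : Int) (st : List (List Int) × PySem.Dict (List Int) Bool) (p : List Int) :
    List (List Int) × PySem.Dict (List Int) Bool :=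
  if st.2.contains (pvKeyOf p i) then (st.1, st.2)
  else (st.1 ++ [p ++ [i]], st.2.insert (pvKeyOf p i) true)

theorem pvALevel_true (lo hi : Int) (ps : List (List Int)) :
    pvALevel true lo hi ps =
      ((PySem.List.pyRange lo (hi + 1) 1).foldl (fun st i => ps.foldl (pvAStepT i) st)
        (([] : List (List Int)), (PySem.Dict.empty : PySem.Dict (List Int) Bool))).1 := by
  unfold pvALevel
  congr 2
  funext st i
  congr 1
  funext st p
  unfold pvAStepT pvKeyOf
  by_cases h : st.2.contains (PySem.List.sorted (p ++ [i]) (fun x => x) false) <;> simp [h]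

theorem pvALevel_false (lo hi : Int) (ps : List (List Int)) :
    pvALevel false lo hi ps =
      ((PySem.List.pyRange lo (hi + 1) 1).foldl
        (fun st i => ps.foldl (fun st p => (st.1 ++ [p ++ [i]], st.2)) st)
        (([] : List (List Int)), (PySem.Dict.empty : PySem.Dict (List Int) Bool))).1 := by
  unfold pvALevel
  congr 2

-- dict contents while A's dedup double loop runs: keys of all combinations already emitted
def pvDS (lo j : Int) (ps pre : List (List Int)) (k : List Int) : Prop :=
  (∃ p ∈ ps, ∃ i', lo ≤ i' ∧ i' < j ∧ i' ≤ pvLastD p ∧ k = pvKeyOf p i') ∨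
  (∃ p ∈ pre, j ≤ pvLastD p ∧ k = pvKeyOf p j)

theorem pvInner (lo hi j : Int) (n : Nat) (ps : List (List Int))
    (hInv : pvInv lo hi n ps) (hlo : lo ≤ j) (hhi : j ≤ hi) :
    ∀ (suf pre : List (List Int)), ps = pre ++ suf →
    ∀ (res : List (List Int)) (d : PySem.Dict (List Int) Bool),
      (∀ k, d.contains k = true ↔ pvDS lo j ps pre k) →
    ∃ d', suf.foldl (pvAStepT j) (res, d)
        = (res ++ (suf.filter (fun p => decide (j ≤ pvLastD p))).map (fun p => p ++ [j]), d')
      ∧ ∀ k, d'.contains k = true ↔ pvDS lo j ps (pre ++ suf) k := by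
  obtain ⟨hnd, hprops, hcomp⟩ := hInv
  intro suf
  induction suf with
  | nil =>
    intro pre hsplit res d hd
    exact ⟨d, by simp, by simpa using hd⟩
  | cons p suf' ih =>
    intro pre hsplit res d hd
    have hpmem : p ∈ ps := by rw [hsplit]; simp
    obtain ⟨hpne, hplen, hpNI, hprng⟩ := hprops p hpmem
    by_cases hkeep : j ≤ pvLastD p
    · -- kept: its key is new
      have hNIpj : pvNI (p ++ [j]) := pvNI_keep p j hpNI hpne hkeep
      have hcon : d.contains (pvKeyOf p j) = false := by
        rw [Bool.eq_false_iff]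
        intro hc
        rcases (hd _).mp hc with ⟨p', hp', i', h1, h2, h3, hk⟩ | ⟨p', hp', h3, hk⟩
        · obtain ⟨hp'ne, hp'len, hp'NI, _⟩ := hprops p' hp'
          have := pvKey_inj p' p i' j (pvNI_keep p' i' hp'NI hp'ne h3) hNIpj
            (by omega) hk.symm
          omega
        · have hp'ps : p' ∈ ps := by rw [hsplit]; exact List.mem_append.mpr (Or.inl hp')
          obtain ⟨hp'ne, hp'len, hp'NI, _⟩ := hprops p' hp'ps
          have := pvKey_inj p' p j j (pvNI_keep p' j hp'NI hp'ne h3) hNIpj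
            (by omega) hk.symm
          have hpnotpre : p ∉ pre := by
            rw [hsplit] at hnd
            have := List.disjoint_of_nodup_append hnd
            intro hmem
            exact this hmem (by simp)
          exact hpnotpre (this.1 ▸ hp')
      have hstep : pvAStepT j (res, d) p =
          (res ++ [p ++ [j]], d.insert (pvKeyOf p j) true) := by
        unfold pvAStepT
        rw [hcon]
        simp
      have hd' : ∀ k, (d.insert (pvKeyOf p j) true).contains k = true ↔
          pvDS lo j ps (pre ++ [p]) k := by
        intro k
        rw [PySem.Dict.contains_insert]
        constructor
        · intro hc
          rcases Bool.or_eq_true_iff.mp hc with hc | hc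
          · right
            exact ⟨p, by simp, hkeep, by simpa using (beq_iff_eq.mp hc)⟩
          · rcases (hd _).mp hc with hl | ⟨p', hp', h3, hk⟩
            · exact Or.inl hl
            · exact Or.inr ⟨p', by simp [hp'], h3, hk⟩
        · intro hds
          rcases hds with hl | ⟨p', hp', h3, hk⟩
          · exact Bool.or_eq_true_iff.mpr (Or.inr ((hd _).mpr (Or.inl hl)))
          · rcases List.mem_append.mp hp' with h1 | h1
            · exact Bool.or_eq_true_iff.mpr (Or.inr ((hd _).mpr (Or.inr ⟨p', h1, h3, hk⟩)))
            · simp at h1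
              subst h1
              exact Bool.or_eq_true_iff.mpr (Or.inl (beq_iff_eq.mpr hk))
      obtain ⟨d', hfold, hspec⟩ := ih (pre ++ [p]) (by rw [hsplit]; simp)
        (res ++ [p ++ [j]]) _ hd'
      refine ⟨d', ?_, ?_⟩
      · rw [List.foldl_cons, hstep, hfold]
        simp [hkeep]
      · intro k
        rw [hspec k]
        rw [hsplit]
        constructor <;> (intro h; rcases h with hl | ⟨p', hp', h3, hk⟩)
        · exact Or.inl hl
        · exact Or.inr ⟨p', by simpa using hp', h3, hk⟩
        · exact Or.inl hl
        · exact Or.inr ⟨p', by simpa using hp', h3, hk⟩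
    · -- duplicate: its key is already present
      have hcon : d.contains (pvKeyOf p j) = true := by
        apply (hd _).mpr
        left
        obtain ⟨p', hp', i', h1, h2, h3, hk⟩ := pvDupe_witness lo hi n ps hcomp p j
          hpne hplen hpNI hprng hlo hhi (by omega)
        exact ⟨p', hp', i', h1, h2, h3, hk.symm⟩
      have hstep : pvAStepT j (res, d) p = (res, d) := by
        unfold pvAStepT
        rw [hcon]
        simp
      have hd' : ∀ k, d.contains k = true ↔ pvDS lo j ps (pre ++ [p]) k := by
        intro k
        rw [hd k]
        constructor <;> (intro h; rcases h with hl | ⟨p', hp', h3, hk⟩)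
        · exact Or.inl hl
        · exact Or.inr ⟨p', by simp [hp'], h3, hk⟩
        · exact Or.inl hl
        · rcases List.mem_append.mp hp' with h1 | h1
          · exact Or.inr ⟨p', h1, h3, hk⟩
          · simp at h1; subst h1; omega
      obtain ⟨d', hfold, hspec⟩ := ih (pre ++ [p]) (by rw [hsplit]; simp) res _ hd'
      refine ⟨d', ?_, ?_⟩
      · rw [List.foldl_cons, hstep, hfold]
        simp [hkeep]
      · intro k
        rw [hspec k]
        constructor <;> (intro h; rcases h with hl | ⟨p', hp', h3, hk⟩)
        · exact Or.inl hl
        · exact Or.inr ⟨p', by simpa using hp', h3, hk⟩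
        · exact Or.inl hl
        · exact Or.inr ⟨p', by simpa using hp', h3, hk⟩

theorem pvDS_shift (lo j : Int) (ps : List (List Int)) (hlo : lo ≤ j) (k : List Int) :
    pvDS lo j ps ps k ↔ pvDS lo (j + 1) ps [] k := by
  unfold pvDS
  constructor
  · intro h
    rcases h with ⟨p, hp, i', h1, h2, h3, hk⟩ | ⟨p, hp, h3, hk⟩
    · exact Or.inl ⟨p, hp, i', h1, by omega, h3, hk⟩
    · exact Or.inl ⟨p, hp, j, hlo, by omega, h3, hk⟩
  · intro h
    rcases h with ⟨p, hp, i', h1, h2, h3, hk⟩ | ⟨p, hp, h3, hk⟩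
    · by_cases hij : i' < j
      · exact Or.inl ⟨p, hp, i', h1, hij, h3, hk⟩
      · have : i' = j := by omega
        subst this
        exact Or.inr ⟨p, hp, h3, hk⟩
    · simp at hp

theorem pvOuter (lo hi : Int) (n : Nat) (ps : List (List Int)) (hInv : pvInv lo hi n ps) :
    ∀ (m : Nat) (j : Int), lo ≤ j → (hi + 1 - j).toNat ≤ m →
    ∀ (res : List (List Int)) (d : PySem.Dict (List Int) Bool),
      (∀ k, d.contains k = true ↔ pvDS lo j ps [] k) →
    ((PySem.List.pyRange j (hi + 1) 1).foldl (fun st i => ps.foldl (pvAStepT i) st) (res, d)).1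
      = res ++ (PySem.List.pyRange j (hi + 1) 1).flatMap
          (fun i => (ps.filter (fun p => decide (i ≤ pvLastD p))).map (fun p => p ++ [i])) := by
  intro m
  induction m with
  | zero =>
    intro j hlo hm res d hd
    have : hi + 1 ≤ j := by omega
    rw [PySem.List.pyRange_one_eq_nil this]
    simp
  | succ m ih =>
    intro j hlo hm res d hd
    by_cases hj : hi + 1 ≤ j
    · rw [PySem.List.pyRange_one_eq_nil hj]
      simp
    · have hjlt : j < hi + 1 := by omega
      rw [PySem.List.pyRange_one_cons hjlt]
      rw [List.foldl_cons, List.flatMap_cons]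
      obtain ⟨d', hfold, hspec⟩ := pvInner lo hi j n ps hInv hlo (by omega) ps [] rfl res d
        (by simpa using hd)
      rw [hfold]
      have hspec' : ∀ k, d'.contains k = true ↔ pvDS lo (j + 1) ps [] k := by
        intro k
        rw [hspec k]
        simpa using pvDS_shift lo j ps hlo k
      rw [ih (j + 1) (by omega) (by omega) _ d' hspec']
      simp

theorem pvALevel_true_eq (lo hi : Int) (n : Nat) (ps : List (List Int))
    (hInv : pvInv lo hi n ps) :
    pvALevel true lo hi ps = pvBStep true (PySem.List.pyRange lo (hi + 1) 1) ps := by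
  rw [pvALevel_true, pvBStep_true_eq]
  have hd : ∀ k, (PySem.Dict.empty : PySem.Dict (List Int) Bool).contains k = true ↔
      pvDS lo lo ps [] k := by
    intro k
    simp [PySem.Dict.contains_empty, pvDS]
    intro p _ i' h1 h2
    omega
  rw [pvOuter lo hi n ps hInv ((hi + 1 - lo).toNat) lo le_rfl le_rfl [] _ hd]
  unfold pvLastD
  simp

theorem pvFoldl_pair_false (i : Int) (ps : List (List Int)) :
    ∀ (res : List (List Int)) (d : PySem.Dict (List Int) Bool),
      ps.foldl (fun st p => (st.1 ++ [p ++ [i]], st.2)) (res, d)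
        = (res ++ ps.map (fun p => p ++ [i]), d) := by
  induction ps with
  | nil => intro res d; simp
  | cons p ps' ih => intro res d; rw [List.foldl_cons, ih]; simp

theorem pvALevel_false_eq (lo hi : Int) (ps : List (List Int)) :
    pvALevel false lo hi ps = pvBStep false (PySem.List.pyRange lo (hi + 1) 1) ps := by
  rw [pvALevel_false, pvBStep_false_eq]
  have main : ∀ (l : List Int) (res : List (List Int)) (d : PySem.Dict (List Int) Bool),
      (l.foldl (fun st i => ps.foldl (fun st p => (st.1 ++ [p ++ [i]], st.2)) st) (res, d)).1
        = res ++ l.flatMap (fun i => ps.map (fun p => p ++ [i])) := by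
    intro l
    induction l with
    | nil => intro res d; simp
    | cons i l' ih => intro res d; rw [List.foldl_cons, pvFoldl_pair_false, ih]; simp
  rw [main]
  simp

theorem pvMain (lo hi : Int) (dup : Bool) :
    ∀ n : Nat, 1 ≤ n →
      pvAGo n lo hi dup
        = (List.range (n - 1)).foldl
            (fun ps _ => pvBStep dup (PySem.List.pyRange lo (hi + 1) 1) ps)
            ((PySem.List.pyRange lo (hi + 1) 1).map (fun x => [x]))
      ∧ (dup = true → pvInv lo hi n (pvAGo n lo hi dup)) := by
  intro n
  induction n with
  | zero => omega
  | succ m ih =>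
    intro _
    match m, ih with
    | 0, _ =>
      refine ⟨by simp [pvAGo], fun _ => by simpa [pvAGo] using pvInv_base lo hi⟩
    | (k+1), ih =>
      obtain ⟨heq, hinv⟩ := ih (by omega)
      have hstep : pvAGo (k + 2) lo hi dup
          = pvBStep dup (PySem.List.pyRange lo (hi + 1) 1) (pvAGo (k + 1) lo hi dup) := by
        show pvALevel dup lo hi (pvAGo (k + 1) lo hi dup) = _
        cases dup with
        | false => exact pvALevel_false_eq lo hi _
        | true => exact pvALevel_true_eq lo hi (k + 1) _ (hinv rfl)
      constructor
      · rw [hstep, heq]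
        have : (k + 1 + 1 - 1) = (k + 1 - 1) + 1 := by omega
        rw [this, List.range_succ, List.foldl_append]
        simp
      · intro hdup
        subst hdup
        rw [hstep]
        exact pvInv_step lo hi (k + 1) _ (by omega) (hinv rfl)

-- ===== VERDICT (by name: the statement is the Claim_ definition above) =====
theorem get_server_group_size_permutations_spec : Claim_equal_get_server_group_size_permutations := by
  intro c lo hi dup _ hpre
  unfold Pre_get_server_group_size_permutations at hpre
  unfold Spec_get_server_group_size_permutations
  unfold get_server_group_size_permutations get_server_group_size_permutations_alt
  have hn : 1 ≤ c.toNat := by omega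
  have h1 : (c - 1).toNat = c.toNat - 1 := by omega
  rw [h1]
  exact (pvMain lo hi dup c.toNat hn).1
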